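-- pv_equiv track=rewrite | github.com/thanthanswe0310/Data-Structures-And-Algorithm-Practice | minabsdifference.py | solution
-- ===== SOURCE A (Python) =====
-- def solution(A):
--     N = len(A)
--     min_sum = float('inf')
--
--     # Generate all possible combinations of signs for the elements in A
--     for i in range(1 << N):
--         current_sum = 0
--         for j in range(N):
--             # If j-th bit is 0, use -1; otherwise, use 1
--             sign = -1 if (i >> j) & 1 == 0 else 1
--             current_sum += sign * A[j]
--         min_sum = min(min_sum, abs(current_sum))
--
--     return min_sum
-- ===== SOURCE B (Python) =====
-- def solution(A):
--     # Subset-sum DP: every signed sum equals total - 2*(sum of the negatively-signed subset).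
--     sums = {0}
--     for a in A:
--         sums |= {s + a for s in sums}
--     total = sum(A)
--     return min(abs(total - 2 * s) for s in sums)
-- ===== Notes on version B (the rewrite author's own statement) =====
-- stated objective: faster
-- what changed: Replaces A's enumeration of all 2^N sign vectors (bitmask loop with an inner per-element pass) by a subset-sum dynamic program over the set of reachable subset sums, returning min |total - 2*s|.
import Mathlib
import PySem

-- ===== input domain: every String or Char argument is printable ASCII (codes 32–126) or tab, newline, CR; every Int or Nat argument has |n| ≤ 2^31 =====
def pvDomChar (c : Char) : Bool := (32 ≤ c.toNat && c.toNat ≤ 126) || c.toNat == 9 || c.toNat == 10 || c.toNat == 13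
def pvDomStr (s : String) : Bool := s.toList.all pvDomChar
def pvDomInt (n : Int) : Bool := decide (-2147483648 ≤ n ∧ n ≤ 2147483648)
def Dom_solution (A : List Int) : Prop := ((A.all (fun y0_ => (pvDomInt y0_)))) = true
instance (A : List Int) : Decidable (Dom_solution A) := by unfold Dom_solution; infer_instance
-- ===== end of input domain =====

-- B replaces A's O(2^N · N) sign enumeration by a subset-sum DP over the set of
-- reachable subset sums, returning min |total - 2·s| (objective: faster, asymptotic).

-- ===== PORT A =====
-- inner loop of A: current_sum over j in range(N); '(i >> j) & 1' is '>>>' / PySem.Int.band (Python-exact)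
def pvInner (A : List Int) (i : Int) : Int :=
  (PySem.List.pyRange 0 (A.length : Int) 1).foldl
    (fun cs j =>
      cs + (if PySem.Int.band (i >>> j.toNat) 1 == 0 then (-1 : Int) else 1)
             * PySem.List.pyGetD A j 0) 0

-- min_sum starts at float('inf'): modeled as Option Int, 'none' = inf; min(inf, x) = x
def pvMinStep (m : Option Int) (x : Int) : Option Int :=
  some (match m with
        | none => x
        | some v => min v x)

def solution (A : List Int) : Int :=
  match (PySem.List.pyRange 0 ((1 : Int) <<< A.length) 1).foldl
          (fun m i => pvMinStep m |pvInner A i|) none with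
  | some v => v
  | none => 0  -- unreachable: range(1 << N) is never empty

-- ===== PORT B =====
-- one step of the DP: sums |= {s + a for s in sums}
def pvStep (S : PySem.Set Int) (a : Int) : PySem.Set Int :=
  PySem.Set.union S (PySem.Set.ofList (S.map (fun s => s + a)))

def solution_alt (A : List Int) : Int :=
  let sums : PySem.Set Int := A.foldl pvStep (PySem.Set.ofList [0])
  let total : Int := A.sum
  match PySem.List.min? (sums.map (fun s => |total - 2 * s|)) (fun x => x) with
  | some v => v
  | none => 0  -- unreachable: 0 is always in sums

-- ===== PRECONDITION & SPEC =====
def Spec_solution (A : List Int) (out : Int) : Prop := out = solution_alt A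
instance (A : List Int) (out : Int) : Decidable (Spec_solution A out) := by unfold Spec_solution; infer_instance

-- ===== CLAIM (what is proved, stated in full; the proofs are below) =====
def Claim_equal_solution : Prop := ∀ (A : List Int), Dom_solution A → Spec_solution A (solution A)

-- ===== LEMMAS AND PROOFS =====

-- all subset sums of a list (reference list for both ports; duplicates allowed)
def pvSubs : List Int → List Int
  | [] => [0]
  | a :: l => pvSubs l ++ (pvSubs l).map (fun s => s + a)

theorem pvZero_mem_pvSubs (l : List Int) : (0 : Int) ∈ pvSubs l := by
  induction l with
  | nil => simp [pvSubs]
  | cons a l ih => simp [pvSubs]; exact Or.inl ih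

-- B's fold reaches exactly {y + t | y ∈ S, t subset-sum of l}
theorem pvMem_foldl_pvStep (l : List Int) (S : PySem.Set Int) (x : Int) :
    x ∈ l.foldl pvStep S ↔ ∃ y ∈ S, ∃ t ∈ pvSubs l, x = y + t := by
  induction l generalizing S with
  | nil => simp [pvSubs]
  | cons a l ih =>
    simp only [List.foldl_cons, ih, pvStep, pvSubs, List.mem_append, List.mem_map,
      PySem.Set.mem_union, PySem.Set.mem_ofList]
    constructor
    · rintro ⟨y, hy | ⟨z, hz, rfl⟩, t, ht, rfl⟩
      · exact ⟨y, hy, t, Or.inl ht, rfl⟩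
      · exact ⟨z, hz, t + a, Or.inr ⟨t, ht, rfl⟩, by ring⟩
    · rintro ⟨y, hy, t, ht | ⟨u, hu, rfl⟩, rfl⟩
      · exact ⟨y, Or.inl hy, t, ht, rfl⟩
      · exact ⟨y + a, Or.inr ⟨y, hy, rfl⟩, u, hu, by ring⟩

theorem pvMem_sums (A : List Int) (x : Int) :
    x ∈ A.foldl pvStep (PySem.Set.ofList [0]) ↔ x ∈ pvSubs A := by
  rw [pvMem_foldl_pvStep]
  constructor
  · rintro ⟨y, hy, t, ht, rfl⟩
    simp only [PySem.Set.mem_ofList, List.mem_singleton] at hy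
    subst hy; simpa using ht
  · intro hx; exact ⟨0, by simp [PySem.Set.mem_ofList], x, hx, by ring⟩

-- A's inner sum, structurally
theorem pvInner_nil (i : Int) : pvInner [] i = 0 := by
  simp [pvInner, PySem.List.pyRange_one_eq_nil]
theorem pvInner_cons (a : Int) (l : List Int) (k : Nat) :
    pvInner (a :: l) (k : Int) =
      (if k % 2 = 0 then -a else a) + pvInner l ((k / 2 : Nat) : Int) := by
  unfold pvInner
  rw [PySem.List.pyRange_one, PySem.List.pyRange_one]
  rw [List.foldl_map, List.foldl_map]
  simp only [List.length_cons, Int.sub_zero, Int.toNat_natCast]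
  rw [List.range_succ_eq_map, List.foldl_cons, List.foldl_map]
  rw [PySem.List.foldl_add, PySem.List.foldl_add]
  simp only [zero_add, Int.toNat_natCast]
  congr 1
  · rw [Int.shiftRight_natCast, Nat.shiftRight_zero, PySem.Int.band_one, show (2:Int) = ((2:Nat):Int) from rfl, PySem.Int.mod_natCast]
    by_cases h : k % 2 = 0
    · simp [h, PySem.List.pyGetD]
    · simp [h, PySem.List.pyGetD]
      intro hd
      omega
  · refine congrArg List.sum (List.map_congr_left ?_)
    intro y _
    rw [Int.shiftRight_natCast, Int.shiftRight_natCast]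
    have h3 : k >>> (Nat.succ y) = (k / 2) >>> y := by
      rw [show Nat.succ y = 1 + y from by omega, Nat.shiftRight_add, Nat.shiftRight_one]
    rw [h3, PySem.List.pyGetD_natCast, PySem.List.pyGetD_natCast]
    rfl

-- A's enumerated values are exactly {sum - 2t | t subset-sum}
theorem pvInner_char (l : List Int) (x : Int) :
    (∃ k : Nat, k < 2 ^ l.length ∧ x = pvInner l (k : Int)) ↔
      ∃ t ∈ pvSubs l, x = l.sum - 2 * t := by
  induction l generalizing x with
  | nil => simp [pvSubs, pvInner_nil]
  | cons a L ih =>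
    constructor
    · rintro ⟨k, hk, rfl⟩
      obtain ⟨t, ht, hy⟩ := (ih (pvInner L ((k / 2 : Nat) : Int))).mp
        ⟨k / 2, by simp [List.length_cons] at hk; omega, rfl⟩
      by_cases hb : k % 2 = 0
      · refine ⟨t + a, ?_, ?_⟩
        · simp only [pvSubs, List.mem_append, List.mem_map]
          exact Or.inr ⟨t, ht, rfl⟩
        · rw [pvInner_cons, hy, if_pos hb]
          simp only [List.sum_cons]
          ring
      · refine ⟨t, ?_, ?_⟩
        · simp only [pvSubs, List.mem_append, List.mem_map]
          exact Or.inl ht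
        · rw [pvInner_cons, hy, if_neg hb]
          simp only [List.sum_cons]
          ring
    · rintro ⟨t', ht', rfl⟩
      simp only [pvSubs, List.mem_append, List.mem_map] at ht'
      rcases ht' with ht | ⟨t, ht, rfl⟩
      · -- t' ∈ pvSubs L : sign +a, k = 2q+1
        obtain ⟨q, hq, hy⟩ := (ih (L.sum - 2 * t')).mpr ⟨t', ht, rfl⟩
        refine ⟨2 * q + 1, by simp [List.length_cons]; omega, ?_⟩
        rw [pvInner_cons]
        have h1 : (2 * q + 1) % 2 = 1 := by omega
        have h2 : (2 * q + 1) / 2 = q := by omega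
        rw [h1, h2, if_neg (by omega : ¬(1:Nat) = 0), ← hy]
        simp only [List.sum_cons]
        ring
      · -- t' = t + a : sign -a, k = 2q
        obtain ⟨q, hq, hy⟩ := (ih (L.sum - 2 * t)).mpr ⟨t, ht, rfl⟩
        refine ⟨2 * q, by simp [List.length_cons]; omega, ?_⟩
        rw [pvInner_cons]
        have h1 : (2 * q) % 2 = 0 := by omega
        have h2 : (2 * q) / 2 = q := by omega
        rw [h1, h2, if_pos rfl, ← hy]
        simp only [List.sum_cons]
        ring

-- Option-min fold = running min
theorem pvFoldl_pvMinStep_some (l : List Int) (v : Int) :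
    l.foldl pvMinStep (some v) = some (l.foldl min v) := by
  induction l generalizing v with
  | nil => rfl
  | cons x t ih => simp [pvMinStep, ih]

theorem pvFoldl_pvMinStep_none (x : Int) (t : List Int) :
    (x :: t).foldl pvMinStep none = some (t.foldl min x) := by
  simp [List.foldl_cons, pvMinStep, pvFoldl_pvMinStep_some]

-- two nonempty lists with the same members have the same minimum value
theorem pvMin_eq_of_mem_iff {v1 v2 : Int} {L1 L2 : List Int}
    (h1m : v1 ∈ L1) (h1le : ∀ y ∈ L1, v1 ≤ y)
    (h2m : v2 ∈ L2) (h2le : ∀ y ∈ L2, v2 ≤ y)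
    (h : ∀ x, x ∈ L1 ↔ x ∈ L2) : v1 = v2 :=
  le_antisymm (h1le v2 ((h v2).mpr h2m)) (h2le v1 ((h v1).mp h1m))

-- ===== VERDICT (by name: the statement is the Claim_ definition above) =====

theorem pvFoldl_min_char (L : List Int) (h : L ≠ []) :
    ∃ v, L.foldl pvMinStep none = some v ∧ v ∈ L ∧ ∀ y ∈ L, v ≤ y := by
  obtain ⟨x, t, rfl⟩ := List.exists_cons_of_ne_nil h
  refine ⟨t.foldl min x, pvFoldl_pvMinStep_none x t, ?_, ?_⟩
  · rcases PySem.List.foldl_min_mem t x with h1 | h1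
    · rw [h1]; exact List.mem_cons_self
    · exact List.mem_cons_of_mem x h1
  · intro y hy
    rcases List.mem_cons.mp hy with rfl | hy
    · exact (PySem.List.foldl_min_le t y).1
    · exact (PySem.List.foldl_min_le t x).2 y hy

theorem pvShift_pow (n : Nat) : ((1 : Int) <<< n) = ((2 ^ n : Nat) : Int) := by
  rw [Int.shiftLeft_eq]; push_cast; ring

theorem solution_spec : Claim_equal_solution := by
  intro A _
  unfold Spec_solution solution solution_alt
  -- A's fold as a fold over a list of values
  have hfm : ∀ (L : List Int),
      L.foldl (fun m i => pvMinStep m |pvInner A i|) none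
        = (L.map (fun i => |pvInner A i|)).foldl pvMinStep none :=
    fun L => by rw [List.foldl_map]
  rw [hfm]
  rw [PySem.List.pyRange_one, pvShift_pow, List.map_map]
  simp only [Int.sub_zero, Int.toNat_natCast]
  set LA := (List.range (2 ^ A.length)).map ((fun i => |pvInner A i|) ∘ (fun k : Nat => (0 : Int) + ↑k)) with hLA
  set sums := A.foldl pvStep (PySem.Set.ofList [0]) with hsums
  set LB := sums.map (fun s => |A.sum - 2 * s|) with hLB
  have hAne : LA ≠ [] := by
    simp [hLA, List.map_eq_nil_iff, List.range_eq_nil]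
  have hBne : LB ≠ [] := by
    have h0 : (0 : Int) ∈ sums := (pvMem_sums A 0).mpr (pvZero_mem_pvSubs A)
    simp only [hLB, ne_eq, List.map_eq_nil_iff]
    intro hnil; rw [hnil] at h0; exact (List.not_mem_nil) h0
  have hmem : ∀ x, x ∈ LA ↔ x ∈ LB := by
    intro x
    simp only [hLA, hLB, List.mem_map, List.mem_range, Function.comp]
    constructor
    · rintro ⟨k, hk, rfl⟩
      obtain ⟨t, ht, hx⟩ := (pvInner_char A (pvInner A ((0:Int) + ↑k))).mp
        ⟨k, hk, by rw [zero_add]⟩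
      exact ⟨t, (pvMem_sums A t).mpr ht, by rw [hx]⟩
    · rintro ⟨s, hs, rfl⟩
      obtain ⟨k, hk, hx⟩ := (pvInner_char A (A.sum - 2 * s)).mpr
        ⟨s, (pvMem_sums A s).mp hs, rfl⟩
      exact ⟨k, hk, by rw [zero_add, ← hx]⟩
  obtain ⟨v1, hfold, hv1m, hv1le⟩ := pvFoldl_min_char LA hAne
  obtain ⟨v2, hv2⟩ : ∃ v2, PySem.List.min? LB (fun x => x) = some v2 :=
    Option.ne_none_iff_exists'.mp
      (fun hnone => hBne ((PySem.List.min?_eq_none_iff _ _).mp hnone))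
  have hv2m := PySem.List.min?_mem hv2
  have hv2le := PySem.List.min?_isMin hv2
  rw [hfold, hv2]
  exact pvMin_eq_of_mem_iff hv1m hv1le hv2m hv2le hmem
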